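-- pv_equiv track=rewrite | github.com/Nodoame05/Chikuzenni | invitation.py | _encode_decimal62
-- ===== SOURCE A (Python) =====
-- def _encode_decimal62(num):
--     chars = "0123456789abcdefghijklmnopqrstuvwxyzABCDEFGHIJELMNOPQRSTUVWXYZ"
--     base = len(chars)
--     string = ""
--     while True:
--         string = chars[num % base] + string
--         num = num // base
--         if num == 0:
--             break
--     return string
-- ===== SOURCE B (Python) =====
-- def _encode_decimal62(num):
--     chars = "0123456789abcdefghijklmnopqrstuvwxyzABCDEFGHIJELMNOPQRSTUVWXYZ"
--     base = len(chars)
--     p = 1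
--     while p * base <= num:
--         p *= base
--     digits = []
--     while p > 0:
--         digits.append(chars[(num // p) % base])
--         p //= base
--     return "".join(digits)
-- ===== Notes on version B (the rewrite author's own statement) =====
-- stated objective: alternative
-- what changed: Instead of A's prepend-to-string loop over num (least-significant digit first), B first finds the largest base power not exceeding the input, then emits digits most-significant-first by dividing by descending powers, joining a list at the end (same 62-char table, typo included).
import Mathlib
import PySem

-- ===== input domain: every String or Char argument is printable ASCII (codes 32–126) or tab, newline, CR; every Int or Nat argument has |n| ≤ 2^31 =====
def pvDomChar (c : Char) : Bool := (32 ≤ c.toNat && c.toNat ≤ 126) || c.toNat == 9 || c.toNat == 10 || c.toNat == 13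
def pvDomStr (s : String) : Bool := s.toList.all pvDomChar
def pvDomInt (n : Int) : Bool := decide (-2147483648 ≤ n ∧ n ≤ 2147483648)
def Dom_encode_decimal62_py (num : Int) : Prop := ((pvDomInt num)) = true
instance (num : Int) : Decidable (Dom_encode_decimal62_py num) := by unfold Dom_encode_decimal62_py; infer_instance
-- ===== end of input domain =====

-- B replaces A's prepend-to-string loop (LSB first) with a powers-of-62 scan: find the
-- largest base power not exceeding the input, then emit digits most-significant-first by dividing by
-- descending powers; same 62-char table, typo included; objective: alternative.


-- ===== PORT A =====
-- chars = "0123456789abcdefghijklmnopqrstuvwxyzABCDEFGHIJELMNOPQRSTUVWXYZ" (the table, typo kept)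
def pvCharsA : List Char := "0123456789abcdefghijklmnopqrstuvwxyzABCDEFGHIJELMNOPQRSTUVWXYZ".toList

-- the while-True loop of A; chars[num % 62] is always in range since mod 62 ∈ [0,62),
-- so pyGetD is exact here. The '0 < n' stop is a totality guard only: Python diverges
-- on negative num and Pre_ excludes it.
def pvLoopA (num : Int) (string : List Char) : List Char :=
  let string := PySem.List.pyGetD pvCharsA (PySem.Int.mod num 62) '0' :: string
  let n := PySem.Int.floordiv num 62
  if h : 0 < n then pvLoopA n string else string
termination_by num.toNat
decreasing_by
  have hb : (0:Int) < 62 := by omega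
  have := PySem.Int.floordiv_mul_add_mod num 62
  have hm := PySem.Int.mod_nonneg num hb
  have hl := PySem.Int.mod_lt num hb
  omega

def encode_decimal62_py (num : Int) : String := String.ofList (pvLoopA num [])

-- ===== PORT B =====
def pvCharsB : List Char := "0123456789abcdefghijklmnopqrstuvwxyzABCDEFGHIJELMNOPQRSTUVWXYZ".toList

-- first loop of B: p = 1; while p * 62 <= num: p *= 62.  The '0 < p' conjunct is a
-- totality guard only: Python's p starts at 1 and stays positive.
def pvPowB (p num : Int) : Int :=
  if h : 0 < p ∧ p * 62 ≤ num then pvPowB (p * 62) num else p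
termination_by (num - p).toNat
decreasing_by omega

-- second loop of B: while p > 0: digits.append(chars[(num // p) % 62]); p //= 62.
-- (num // p) % 62 ∈ [0,62) so pyGetD is exact; list append ↦ cons-in-order recursion.
def pvExtractB (p num : Int) : List Char :=
  if h : 0 < p then
    PySem.List.pyGetD pvCharsB (PySem.Int.mod (PySem.Int.floordiv num p) 62) '0'
      :: pvExtractB (PySem.Int.floordiv p 62) num
  else []
termination_by p.toNat
decreasing_by
  have hb : (0:Int) < 62 := by omega
  have := PySem.Int.floordiv_mul_add_mod p 62
  have hm := PySem.Int.mod_nonneg p hb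
  have hl := PySem.Int.mod_lt p hb
  omega

def encode_decimal62_py_alt (num : Int) : String :=
  String.ofList (pvExtractB (pvPowB 1 num) num)

-- ===== PRECONDITION & SPEC =====
-- Pre_ excludes negative num, on which Python A loops forever (num // 62 never reaches 0).
def Pre_encode_decimal62_py (num : Int) : Prop := 0 ≤ num
instance (num : Int) : Decidable (Pre_encode_decimal62_py num) := by unfold Pre_encode_decimal62_py; infer_instance
def pvWitness_encode_decimal62_py : Int := (7444)

def Spec_encode_decimal62_py (num : Int) (out : String) : Prop := out = encode_decimal62_py_alt num
instance (num : Int) (out : String) : Decidable (Spec_encode_decimal62_py num out) := by unfold Spec_encode_decimal62_py; infer_instance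

-- ===== CLAIM (what is proved, stated in full; the proofs are below) =====
def Claim_equal_encode_decimal62_py : Prop := ∀ (num : Int), Dom_encode_decimal62_py num → Pre_encode_decimal62_py num → Spec_encode_decimal62_py num (encode_decimal62_py num)

-- ===== LEMMAS AND PROOFS =====

-- canonical MSB-first base-62 digit list of a nonnegative integer (proof-side only)
def pvDigits (num : Int) : List Char :=
  if h : num < 62 then [PySem.List.pyGetD pvCharsA num '0']
  else pvDigits (PySem.Int.floordiv num 62) ++ [PySem.List.pyGetD pvCharsA (PySem.Int.mod num 62) '0']
termination_by num.toNat
decreasing_by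
  have hb : (0:Int) < 62 := by omega
  have := PySem.Int.floordiv_mul_add_mod num 62
  have hm := PySem.Int.mod_nonneg num hb
  have hl := PySem.Int.mod_lt num hb
  omega

-- A's loop prepends exactly the canonical digit list
theorem pvLoopA_eq (num : Int) (string : List Char) :
    0 ≤ num → pvLoopA num string = pvDigits num ++ string := by
  induction num, string using pvLoopA.induct with
  | case1 num string str1 n hpos ih =>
    intro hnn
    have hn : n = PySem.Int.floordiv num 62 := rfl
    have hs : str1 = PySem.List.pyGetD pvCharsA (PySem.Int.mod num 62) '0' :: string := rfl
    rw [hn] at hpos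
    rw [hn, hs] at ih
    have hb : (0:Int) < 62 := by omega
    have hfm := PySem.Int.floordiv_mul_add_mod num 62
    have hm := PySem.Int.mod_nonneg num hb
    have hl := PySem.Int.mod_lt num hb
    have h62 : ¬ num < 62 := by omega
    rw [pvLoopA]
    simp only [dif_pos hpos]
    rw [ih (by omega)]
    conv_rhs => rw [pvDigits, dif_neg h62]
    simp
  | case2 num string n hnpos =>
    intro hnn
    have hn : n = PySem.Int.floordiv num 62 := rfl
    rw [hn] at hnpos
    have hb : (0:Int) < 62 := by omega
    have hfm := PySem.Int.floordiv_mul_add_mod num 62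
    have hm := PySem.Int.mod_nonneg num hb
    have hl := PySem.Int.mod_lt num hb
    have h62 : num < 62 := by omega
    have hmod : PySem.Int.mod num 62 = num := by omega
    rw [pvLoopA]
    simp only [dif_neg hnpos]
    rw [pvDigits, dif_pos h62, hmod]
    rfl

-- floor division by positive divisors composes (our arguments are nonnegative)
theorem pvFdFd (n a b : Int) (ha : 0 < a) (hb : 0 < b) :
    PySem.Int.floordiv (PySem.Int.floordiv n a) b = PySem.Int.floordiv n (a * b) := by
  rw [PySem.Int.floordiv_eq_ediv_of_pos ha, PySem.Int.floordiv_eq_ediv_of_pos hb,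
      PySem.Int.floordiv_eq_ediv_of_pos (by positivity)]
  exact Int.ediv_ediv_of_nonneg (le_of_lt ha)

-- Python floor division by 1 is the identity
theorem pvFd1 (x : Int) : PySem.Int.floordiv x 1 = x := by
  have := PySem.Int.floordiv_mul_add_mod x 1
  have := PySem.Int.mod_nonneg x (by norm_num : (0:Int) < 1)
  have := PySem.Int.mod_lt x (by norm_num : (0:Int) < 1)
  omega

-- peeling the least significant digit off B's extraction at a power of 62
theorem pvExtract_peel (k : Nat) (num : Int) :
    pvExtractB ((62:Int)^(k+1)) num
      = pvExtractB ((62:Int)^k) (PySem.Int.floordiv num 62)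
        ++ [PySem.List.pyGetD pvCharsB (PySem.Int.mod num 62) '0'] := by
  induction k generalizing num with
  | zero =>
    have h1 : (0:Int) < 62^1 := by norm_num
    rw [pvExtractB, dif_pos h1]
    have : PySem.Int.floordiv ((62:Int)^1) 62 = 1 := by decide
    rw [this, pvExtractB, dif_pos (by norm_num : (0:Int) < 1)]
    have h0 : PySem.Int.floordiv ((1:Int)) 62 = 0 := by decide
    rw [h0, pvExtractB, dif_neg (by norm_num : ¬ (0:Int) < 0)]
    rw [pvExtractB, dif_pos (by norm_num : (0:Int) < (62:Int)^0)]
    have h0' : PySem.Int.floordiv ((62:Int)^0) 62 = 0 := by decide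
    rw [h0', pvExtractB, dif_neg (by norm_num : ¬ (0:Int) < 0)]
    have e1 : PySem.Int.floordiv num ((62:Int)^1) = PySem.Int.floordiv num 62 := by norm_num
    have e2 : PySem.Int.floordiv num 1 = num := pvFd1 num
    have e3 : PySem.Int.floordiv (PySem.Int.floordiv num 62) ((62:Int)^0) = PySem.Int.floordiv num 62 := by
      rw [pow_zero]; exact pvFd1 _
    rw [e1, e2, e3]
    simp
  | succ k ih =>
    have hp : (0:Int) < 62^(k+1+1) := by positivity
    have hp' : (0:Int) < 62^(k+1) := by positivity
    rw [pvExtractB, dif_pos hp]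
    have hdiv : PySem.Int.floordiv ((62:Int)^(k+1+1)) 62 = (62:Int)^(k+1) := by
      rw [PySem.Int.floordiv_eq_ediv_of_pos (by norm_num : (0:Int) < 62)]
      rw [pow_succ]
      exact Int.mul_ediv_cancel _ (by norm_num)
    rw [hdiv, ih num]
    conv_rhs => rw [pvExtractB, dif_pos hp']
    have hfd : PySem.Int.floordiv ((62:Int)^(k+1)) 62 = (62:Int)^k := by
      rw [PySem.Int.floordiv_eq_ediv_of_pos (by norm_num : (0:Int) < 62)]
      rw [pow_succ]
      exact Int.mul_ediv_cancel _ (by norm_num)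
    rw [hfd]
    have hcomp : PySem.Int.floordiv (PySem.Int.floordiv num 62) ((62:Int)^(k+1))
        = PySem.Int.floordiv num ((62:Int)^(k+1+1)) := by
      rw [pvFdFd num 62 ((62:Int)^(k+1)) (by norm_num) hp']
      ring_nf
    rw [hcomp]
    simp

-- at the right power of 62, B's extraction is the canonical digit list
theorem pvExtract_eq_digits (k : Nat) (num : Int) (hn : 0 ≤ num)
    (hub : num < 62^(k+1)) (hlb : (62:Int)^k ≤ num ∨ k = 0) :
    pvExtractB ((62:Int)^k) num = pvDigits num := by
  induction k generalizing num with
  | zero =>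
    have h62 : num < 62 := by simpa using hub
    rw [pvExtractB, dif_pos (by norm_num : (0:Int) < (62:Int)^0)]
    have h0 : PySem.Int.floordiv ((62:Int)^0) 62 = 0 := by decide
    rw [h0, pvExtractB, dif_neg (by norm_num : ¬ (0:Int) < 0)]
    have e2 : PySem.Int.floordiv num ((62:Int)^0) = num := by
      rw [pow_zero]; exact pvFd1 _
    have hmod : PySem.Int.mod num 62 = num := by
      have := PySem.Int.floordiv_mul_add_mod num 62
      have := PySem.Int.mod_nonneg num (by norm_num : (0:Int) < 62)
      have := PySem.Int.mod_lt num (by norm_num : (0:Int) < 62)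
      omega
    rw [e2, hmod, pvDigits, dif_pos h62]
    rfl
  | succ k ih =>
    have hlb' : (62:Int)^(k+1) ≤ num := by
      rcases hlb with h | h
      · exact h
      · omega
    have h62 : ¬ num < 62 := by
      have : (62:Int) ≤ 62^(k+1) := by
        calc (62:Int) = 62^1 := by norm_num
        _ ≤ 62^(k+1) := by
          apply pow_le_pow_right₀ (by norm_num) (by omega)
      omega
    rw [pvExtract_peel k num]
    have hb62 : (0:Int) < 62 := by norm_num
    have hfm := PySem.Int.floordiv_mul_add_mod num 62
    have hm := PySem.Int.mod_nonneg num hb62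
    have hl := PySem.Int.mod_lt num hb62
    have hq : 0 ≤ PySem.Int.floordiv num 62 := by omega
    have hub' : PySem.Int.floordiv num 62 < 62^(k+1) := by
      by_contra hcon
      push_neg at hcon
      have : (62:Int)^(k+1) * 62 ≤ PySem.Int.floordiv num 62 * 62 := by
        apply mul_le_mul_of_nonneg_right hcon (by norm_num)
      have hpow : (62:Int)^(k+1) * 62 = 62^(k+1+1) := by ring
      omega
    have hlb'' : (62:Int)^k ≤ PySem.Int.floordiv num 62 ∨ k = 0 := by
      left
      by_contra hcon
      push_neg at hcon
      have : PySem.Int.floordiv num 62 * 62 + 62 ≤ (62:Int)^k * 62 := by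
        have : PySem.Int.floordiv num 62 + 1 ≤ (62:Int)^k := by omega
        nlinarith [this]
      have hpow : (62:Int)^k * 62 = 62^(k+1) := by ring
      omega
    rw [ih (PySem.Int.floordiv num 62) hq hub' hlb'']
    conv_rhs => rw [pvDigits, dif_neg h62]
    simp [pvCharsA, pvCharsB]

-- B's first loop finds a power of 62 bracketing num
theorem pvPowB_spec (p num : Int) :
    0 < p → ∃ k : Nat, pvPowB p num = p * 62^k ∧ num < p * 62^(k+1) ∧ (p * 62^k ≤ num ∨ k = 0) := by
  induction p using pvPowB.induct (num := num) with
  | case1 p h ih =>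
    intro _
    obtain ⟨hp', hle⟩ := h
    obtain ⟨k, h1, h2, h3⟩ := ih (by omega)
    refine ⟨k + 1, ?_, ?_, ?_⟩
    · rw [pvPowB, dif_pos ⟨hp', hle⟩, h1]; ring
    · calc num < p * 62 * 62^(k+1) := h2
        _ = p * 62^(k+1+1) := by ring
    · left
      rcases h3 with hle' | hk0
      · calc p * 62^(k+1) = p * 62 * 62^k := by ring
          _ ≤ num := hle'
      · subst hk0; simpa using hle
  | case2 p h =>
    intro hp
    rcases lt_or_ge num (p * 62) with hlt | hge
    · exact ⟨0, by rw [pvPowB, dif_neg h]; ring, by simpa using hlt, Or.inr rfl⟩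
    · exact absurd ⟨hp, hge⟩ h

-- ===== VERDICT (by name: the statement is the Claim_ definition above) =====
theorem encode_decimal62_py_spec : Claim_equal_encode_decimal62_py := by
  intro num _ hpre
  unfold Spec_encode_decimal62_py encode_decimal62_py encode_decimal62_py_alt
  rw [pvLoopA_eq num [] hpre, List.append_nil]
  obtain ⟨k, h1, h2, h3⟩ := pvPowB_spec 1 num (by norm_num)
  rw [h1]
  simp only [one_mul] at h1 h2 h3 ⊢
  rw [pvExtract_eq_digits k num hpre h2 h3]
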